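-- pv_equiv track=rewrite | github.com/chaoxiongTian/MasterExp | CaptchaSegment/projection.py | adjust_project_data
-- ===== SOURCE A (Python) =====
-- def adjust_project_data(vertical_pro_list):
--     """
--     调整收集到的投影信息
--     [num1,num2,num3] 变为[[index1,frequent1,num1],[index2,frequent2,num2]]的形式
--     :param vertical_pro_list: 垂直投影的到的数组
--     :return: 调整之后数组
--     """
--     count = 1
--     num = vertical_pro_list[0]
--     result = []
--
--     for i in range(1, len(vertical_pro_list)):
--         if vertical_pro_list[i] != vertical_pro_list[i - 1]:
--             result.append([i - 1, count, num])
--             num = vertical_pro_list[i]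
--             count = 1
--         else:
--             count += 1
--
--     result.append([len(vertical_pro_list) - 1, count, num])
--     return result
-- ===== SOURCE B (Python) =====
-- def adjust_project_data(vertical_pro_list):
--     """Two-pass run-length encoding: first collect run boundaries, then emit
--     one [last_index, length, value] triple per run."""
--     n = len(vertical_pro_list)
--     if n == 0:
--         return []
--     bounds = [i for i in range(1, n)
--               if vertical_pro_list[i] != vertical_pro_list[i - 1]] + [n]
--     result = []
--     start = 0
--     for b in bounds:
--         result.append([b - 1, b - start, vertical_pro_list[start]])
--         start = b
--     return result
-- ===== Notes on version B (the rewrite author's own statement) =====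
-- stated objective: alternative
-- what changed: Replaces the single stateful loop carrying count/num across iterations by a two-pass decomposition: first collect the run-boundary indices, then emit one triple per run from consecutive boundaries.
import Mathlib
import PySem

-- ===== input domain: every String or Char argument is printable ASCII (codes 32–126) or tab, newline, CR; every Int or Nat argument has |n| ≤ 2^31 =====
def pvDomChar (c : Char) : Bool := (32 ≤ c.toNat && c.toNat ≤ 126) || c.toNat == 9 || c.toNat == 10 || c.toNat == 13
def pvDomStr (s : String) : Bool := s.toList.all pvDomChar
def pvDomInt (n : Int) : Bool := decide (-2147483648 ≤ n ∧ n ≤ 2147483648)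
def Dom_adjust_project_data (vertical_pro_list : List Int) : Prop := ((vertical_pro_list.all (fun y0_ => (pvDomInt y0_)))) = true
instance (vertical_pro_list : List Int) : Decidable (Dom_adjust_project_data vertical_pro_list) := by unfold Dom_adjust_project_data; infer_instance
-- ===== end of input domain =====

-- B replaces A's single stateful run-length loop by a two-pass decomposition
-- (collect run boundaries, then emit one triple per run); same O(n) cost.


-- ===== PORT A =====
-- loop body of A: state = (count, num, result); branches in A's order
def pvStepA (l : List Int) (st : Int × Int × List (List Int)) (i : Int) : Int × Int × List (List Int) :=
  if PySem.List.pyGetD l i 0 ≠ PySem.List.pyGetD l (i - 1) 0 then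
    (1, PySem.List.pyGetD l i 0, st.2.2 ++ [[i - 1, st.1, st.2.1]])
  else (st.1 + 1, st.2.1, st.2.2)

def adjust_project_data (vertical_pro_list : List Int) : List (List Int) :=
  -- l[0] is pyGetD here; Pre_ excludes the empty list, where Python raises IndexError reading the first element
  let s := (PySem.List.pyRange 1 (vertical_pro_list.length : Int) 1).foldl (pvStepA vertical_pro_list)
      (1, PySem.List.pyGetD vertical_pro_list 0 0, ([] : List (List Int)))
  s.2.2 ++ [[(vertical_pro_list.length : Int) - 1, s.1, s.2.1]]

-- ===== PORT B =====
-- loop body of B: state = (start, result)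
def pvStepB (l : List Int) (st : Int × List (List Int)) (b : Int) : Int × List (List Int) :=
  (b, st.2 ++ [[b - 1, b - st.1, PySem.List.pyGetD l st.1 0]])

def adjust_project_data_alt (vertical_pro_list : List Int) : List (List Int) :=
  if vertical_pro_list.length = 0 then []
  else
    let bounds := ((PySem.List.pyRange 1 (vertical_pro_list.length : Int) 1).filter
        (fun i => PySem.List.pyGetD vertical_pro_list i 0 != PySem.List.pyGetD vertical_pro_list (i - 1) 0))
      ++ [(vertical_pro_list.length : Int)]
    (bounds.foldl (pvStepB vertical_pro_list) (0, ([] : List (List Int)))).2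

-- ===== PRECONDITION & SPEC =====
-- Pre_ excludes exactly the empty list, on which A raises IndexError reading the first element.
def Pre_adjust_project_data (vertical_pro_list : List Int) : Prop := vertical_pro_list ≠ []
instance (vertical_pro_list : List Int) : Decidable (Pre_adjust_project_data vertical_pro_list) := by unfold Pre_adjust_project_data; infer_instance
def pvWitness_adjust_project_data : List Int := [2, 2, 0, 5]

def Spec_adjust_project_data (vertical_pro_list : List Int) (out : List (List Int)) : Prop := out = adjust_project_data_alt vertical_pro_list
instance (vertical_pro_list : List Int) (out : List (List Int)) : Decidable (Spec_adjust_project_data vertical_pro_list out) := by unfold Spec_adjust_project_data; infer_instance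

-- ===== CLAIM (what is proved, stated in full; the proofs are below) =====
def Claim_equal_adjust_project_data : Prop := ∀ (vertical_pro_list : List Int), Dom_adjust_project_data vertical_pro_list → Pre_adjust_project_data vertical_pro_list → Spec_adjust_project_data vertical_pro_list (adjust_project_data vertical_pro_list)

-- ===== LEMMAS AND PROOFS =====

-- B's fold state after processing the boundaries found in range(1,k)
def pvB (l : List Int) (k : Int) : Int × List (List Int) :=
  ((PySem.List.pyRange 1 k 1).filter
    (fun i => PySem.List.pyGetD l i 0 != PySem.List.pyGetD l (i - 1) 0)).foldl (pvStepB l) (0, [])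

-- loop invariant: A's state after range(1,k) is determined by B's boundary fold
lemma pv_inv (l : List Int) : ∀ (k : Nat), 1 ≤ k →
    (PySem.List.pyRange 1 (k : Int) 1).foldl (pvStepA l)
        (1, PySem.List.pyGetD l 0 0, ([] : List (List Int))) =
      ((k : Int) - (pvB l k).1, PySem.List.pyGetD l (pvB l k).1 0, (pvB l k).2) := by
  intro k hk
  induction k, hk using Nat.le_induction with
  | base =>
      simp [pvB, PySem.List.pyRange_one_eq_nil (by norm_num : (1:Int) ≤ 1)]
  | succ k hk ih =>
      have hkint : (1:Int) ≤ (k:Int) := by exact_mod_cast hk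
      have hcast : (((k + 1 : Nat)) : Int) = (k : Int) + 1 := by push_cast; ring
      rw [hcast, PySem.List.pyRange_one_succ_right hkint, List.foldl_append, ih]
      by_cases h : PySem.List.pyGetD l (k:Int) 0 = PySem.List.pyGetD l ((k:Int) - 1) 0
      · have hf : (PySem.List.pyGetD l (k:Int) 0 != PySem.List.pyGetD l ((k:Int) - 1) 0) = false := by
          simpa only [bne_eq_false_iff_eq]
        have hB : pvB l ((k:Int) + 1) = pvB l (k:Int) := by
          unfold pvB
          rw [PySem.List.pyRange_one_succ_right hkint, List.filter_append]
          simp only [List.filter_cons, List.filter_nil, hf, Bool.false_eq_true, if_false,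
            List.append_nil]
        rw [hB]
        simp only [List.foldl_cons, List.foldl_nil, pvStepA, if_neg (not_not_intro h),
          Prod.mk.injEq, and_true]
        ring
      · have hf : (PySem.List.pyGetD l (k:Int) 0 != PySem.List.pyGetD l ((k:Int) - 1) 0) = true :=
          bne_iff_ne.mpr h
        have hB : pvB l ((k:Int) + 1) = pvStepB l (pvB l (k:Int)) (k:Int) := by
          unfold pvB
          rw [PySem.List.pyRange_one_succ_right hkint, List.filter_append]
          simp only [List.filter_cons, List.filter_nil, hf, if_true, List.foldl_append,
            List.foldl_cons, List.foldl_nil]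
        rw [hB]
        simp only [List.foldl_cons, List.foldl_nil, pvStepA, if_pos h, pvStepB, Prod.mk.injEq, and_true]
        ring

theorem adjust_project_data_spec : Claim_equal_adjust_project_data := by
  intro l _ hpre
  have hlen : l.length ≠ 0 := by
    intro h; exact hpre (List.eq_nil_of_length_eq_zero h)
  have h1 : 1 ≤ l.length := Nat.one_le_iff_ne_zero.mpr hlen
  have hinv := pv_inv l l.length h1
  show adjust_project_data l = adjust_project_data_alt l
  unfold adjust_project_data adjust_project_data_alt
  rw [if_neg hlen]
  simp only [List.foldl_append, hinv]
  simp [pvStepB, pvB]
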